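-- pv_equiv track=rewrite | github.com/xiviu123/rlcard | rlcard/games/dummy/melding.py | get_all_set_melds
-- ===== SOURCE A (Python) =====
-- from typing import List
--
-- def get_card(card_id : int):
--     rank_id = card_id % 13
--     suit_id = int((card_id - rank_id) / 13)
--     return (rank_id, suit_id)
--
-- def get_rank_id(card_id: int):
--     (rank_id, _) = get_card(card_id=card_id)
--     return rank_id
--
-- def get_all_set_melds(cards: List[int]):
--     hand_by_rank  = sorted(cards, key=get_rank_id)
--
--     max_set_melds = []
--     current_rank = None
--     set_meld = []
--
--     for card_id in hand_by_rank:
--         if current_rank is None or current_rank == get_rank_id(card_id):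
--             set_meld.append(card_id)
--         else:
--             if len(set_meld) >= 3:
--                 max_set_melds.append(set_meld)
--             set_meld = [card_id]
--         current_rank = get_rank_id(card_id)
--
--     if len(set_meld) >= 3:
--         max_set_melds.append(set_meld)
--
--     result = []
--     for max_set_meld in max_set_melds:
--         result.append(max_set_meld)
--         if len(max_set_meld) == 4:
--             for meld_card in max_set_meld:
--                 result.append([card for card in max_set_meld if card != meld_card])
--     return result
-- ===== SOURCE B (Python) =====
-- from typing import List
--
-- def get_all_set_melds(cards: List[int]):
--     buckets = {}
--     for card_id in cards:
--         buckets.setdefault(card_id % 13, []).append(card_id)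
--     result = []
--     for rank in sorted(buckets):
--         bucket = buckets[rank]
--         if len(bucket) >= 3:
--             result.append(bucket)
--             if len(bucket) == 4:
--                 for meld_card in bucket:
--                     result.append([card for card in bucket if card != meld_card])
--     return result
-- ===== Notes on version B (the rewrite author's own statement) =====
-- stated objective: idiomatic
-- what changed: Replaces A's sort-the-hand + consecutive-run state machine (current_rank/set_meld scan) and separate second pass by one dict-grouping pass (rank -> bucket) followed by a single loop over the sorted rank keys that emits each meld and its 3-card subsets directly.
import Mathlib
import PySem

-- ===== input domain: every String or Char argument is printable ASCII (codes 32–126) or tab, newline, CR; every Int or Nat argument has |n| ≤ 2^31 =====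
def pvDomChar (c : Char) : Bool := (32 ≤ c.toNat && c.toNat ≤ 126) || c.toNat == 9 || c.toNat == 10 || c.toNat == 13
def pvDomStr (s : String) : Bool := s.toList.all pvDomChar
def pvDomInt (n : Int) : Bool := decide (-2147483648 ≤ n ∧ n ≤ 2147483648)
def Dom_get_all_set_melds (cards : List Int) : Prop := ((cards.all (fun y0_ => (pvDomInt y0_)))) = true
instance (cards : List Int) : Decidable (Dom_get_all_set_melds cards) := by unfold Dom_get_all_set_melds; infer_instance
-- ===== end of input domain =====

-- B groups the hand into rank buckets with one dict pass and emits melds over the sorted rank keys,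
-- replacing A's sort + consecutive-run state machine + second pass; same return value, proved equal.


-- ===== PORT A =====
def get_card (card_id : Int) : Int × Int :=
  let rank_id := PySem.Int.mod card_id 13
  -- int((card_id - rank_id) / 13): truncdiv is exact here since 13 ∣ (card_id - rank_id) and inputs are far below 2^53
  let suit_id := PySem.Int.truncdiv (card_id - rank_id) 13
  (rank_id, suit_id)

def get_rank_id (card_id : Int) : Int := (get_card card_id).1

def get_all_set_melds (cards : List Int) : List (List Int) :=
  let hand_by_rank := PySem.List.sorted cards get_rank_id
  let st := hand_by_rank.foldl
    (fun (st : List (List Int) × Option Int × List Int) card_id =>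
      if st.2.1 = none ∨ st.2.1 = some (get_rank_id card_id) then
        (st.1, some (get_rank_id card_id), st.2.2 ++ [card_id])
      else
        ((if 3 ≤ st.2.2.length then st.1 ++ [st.2.2] else st.1),
         some (get_rank_id card_id), [card_id]))
    ([], none, [])
  let max_set_melds := if 3 ≤ st.2.2.length then st.1 ++ [st.2.2] else st.1
  max_set_melds.foldl
    (fun result m =>
      let result' := result ++ [m]
      if m.length = 4 then
        m.foldl (fun res meld_card => res ++ [m.filter (fun card => card != meld_card)]) result'
      else result')
    []

-- ===== PORT B =====
def get_all_set_melds_alt (cards : List Int) : List (List Int) :=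
  let buckets : PySem.Dict Int (List Int) :=
    cards.foldl
      (fun d card_id => d.modify (PySem.Int.mod card_id 13) [] (fun l => l ++ [card_id]))
      PySem.Dict.empty
  (PySem.List.sorted buckets.keys (fun x => x)).foldl
    (fun result rank =>
      -- buckets[rank]: rank is always a key of the dict here, so the lookup never raises; ported as getD
      let bucket := buckets.getD rank []
      if 3 ≤ bucket.length then
        let result' := result ++ [bucket]
        if bucket.length = 4 then
          bucket.foldl (fun res meld_card => res ++ [bucket.filter (fun card => card != meld_card)]) result'
        else result'
      else result)
    []

-- ===== PRECONDITION & SPEC =====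
def Spec_get_all_set_melds (cards : List Int) (out : List (List Int)) : Prop := out = get_all_set_melds_alt cards
instance (cards : List Int) (out : List (List Int)) : Decidable (Spec_get_all_set_melds cards out) := by unfold Spec_get_all_set_melds; infer_instance

-- ===== CLAIM (what is proved, stated in full; the proofs are below) =====
def Claim_equal_get_all_set_melds : Prop := ∀ (cards : List Int), Dom_get_all_set_melds cards → Spec_get_all_set_melds cards (get_all_set_melds cards)

-- ===== LEMMAS AND PROOFS =====

-- proof-side names for the shapes shared by the two ports
def bucketOf (cards : List Int) (r : Int) : List Int :=
  cards.filter (fun c => get_rank_id c == r)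

def ranksOf (cards : List Int) : List Int :=
  PySem.List.sorted (PySem.Set.ofList (cards.map get_rank_id)) (fun x => x)

def emitMeld (result : List (List Int)) (m : List Int) : List (List Int) :=
  let result' := result ++ [m]
  if m.length = 4 then
    m.foldl (fun res meld_card => res ++ [m.filter (fun card => card != meld_card)]) result'
  else result'

def meldStep (st : List (List Int) × Option Int × List Int) (card_id : Int) :
    List (List Int) × Option Int × List Int :=
  if st.2.1 = none ∨ st.2.1 = some (get_rank_id card_id) then
    (st.1, some (get_rank_id card_id), st.2.2 ++ [card_id])
  else
    ((if 3 ≤ st.2.2.length then st.1 ++ [st.2.2] else st.1),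
     some (get_rank_id card_id), [card_id])

def finishMelds (st : List (List Int) × Option Int × List Int) : List (List Int) :=
  if 3 ≤ st.2.2.length then st.1 ++ [st.2.2] else st.1

def bDict (cards : List Int) : PySem.Dict Int (List Int) :=
  cards.foldl
    (fun d card_id => d.modify (PySem.Int.mod card_id 13) [] (fun l => l ++ [card_id]))
    PySem.Dict.empty

lemma insertBy_nil (bef : Int → Int → Bool) (x : Int) :
    PySem.List.insertBy bef x [] = [x] := rfl

lemma insertBy_cons (bef : Int → Int → Bool) (x y : Int) (ys : List Int) :
    PySem.List.insertBy bef x (y :: ys) =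
      if bef x y then x :: y :: ys else y :: PySem.List.insertBy bef x ys := rfl

lemma insertBy_append_left (bef : Int → Int → Bool) (x : Int) (l1 l2 : List Int)
    (h : ∀ y ∈ l1, bef x y = false) :
    PySem.List.insertBy bef x (l1 ++ l2) = l1 ++ PySem.List.insertBy bef x l2 := by
  induction l1 with
  | nil => simp
  | cons y l1 ih =>
    rw [List.cons_append, insertBy_cons, h y List.mem_cons_self]
    simp only [Bool.false_eq_true, if_false, List.cons_append, List.cons.injEq, true_and]
    exact ih (fun z hz => h z (List.mem_cons_of_mem _ hz))

lemma insertBy_all_before (bef : Int → Int → Bool) (x : Int) (l : List Int)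
    (h : ∀ y ∈ l, bef x y = true) :
    PySem.List.insertBy bef x l = x :: l := by
  cases l with
  | nil => rfl
  | cons y ys => rw [insertBy_cons, h y List.mem_cons_self, if_pos rfl]

lemma flatMap_no_key (x : Int) (B : Int → List Int) (ks : List Int)
    (h : ∀ r ∈ ks, get_rank_id x ≠ r) :
    ks.flatMap (fun r => B r ++ if get_rank_id x == r then [x] else []) = ks.flatMap B := by
  induction ks with
  | nil => rfl
  | cons s ks ih =>
    rw [List.flatMap_cons, List.flatMap_cons, ih (fun r hr => h r (List.mem_cons_of_mem _ hr))]
    have hne : (get_rank_id x == s) = false := by simp [h s List.mem_cons_self]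
    rw [hne]
    simp

lemma key_mem_flatMap (B : Int → List Int) (ks : List Int)
    (hB : ∀ r, ∀ c ∈ B r, get_rank_id c = r) :
    ∀ y ∈ ks.flatMap B, get_rank_id y ∈ ks := by
  intro y hy
  rcases List.mem_flatMap.mp hy with ⟨r, hr, hyB⟩
  rw [hB r y hyB]; exact hr

lemma ins_mem (x : Int) (ks : List Int) (B : Int → List Int)
    (hp : ks.Pairwise (· < ·))
    (hB : ∀ r, ∀ c ∈ B r, get_rank_id c = r)
    (hmem : get_rank_id x ∈ ks) :
    PySem.List.insertBy (fun a b => decide (get_rank_id a < get_rank_id b)) x (ks.flatMap B)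
      = ks.flatMap (fun r => B r ++ if get_rank_id x == r then [x] else []) := by
  induction ks with
  | nil => cases hmem
  | cons s ks ih =>
    rcases List.pairwise_cons.mp hp with ⟨hs, hp'⟩
    rw [List.flatMap_cons, List.flatMap_cons]
    rcases List.mem_cons.mp hmem with h | h
    · -- the new card's rank is this first key: x goes to the end of this bucket
      rw [insertBy_append_left _ _ _ _ (by
        intro y hy
        rw [hB s y hy, h]
        simp)]
      rw [insertBy_all_before _ _ _ (by
        intro y hy
        have hk := key_mem_flatMap B ks hB y hy
        have hlt : s < get_rank_id y := hs _ hk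
        rw [h]
        simpa using hlt)]
      have h1 : (if (get_rank_id x == s) then [x] else ([] : List Int)) = [x] := by simp [h]
      rw [h1, flatMap_no_key x B ks (fun r hr => by have := hs r hr; omega)]
      simp
    · -- the new card's rank lies further right: skip this bucket
      have hlt : s < get_rank_id x := hs _ h
      rw [insertBy_append_left _ _ _ _ (by
        intro y hy
        rw [hB s y hy]
        simp only [decide_eq_false_iff_not, not_lt]
        omega)]
      rw [ih hp' h]
      have h1 : (if (get_rank_id x == s) then [x] else ([] : List Int)) = [] := by
        have : get_rank_id x ≠ s := by omega
        simp [this]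
      rw [h1]
      simp

lemma ins_not_mem (x : Int) (ks : List Int) (B : Int → List Int)
    (hp : ks.Pairwise (· < ·))
    (hB : ∀ r, ∀ c ∈ B r, get_rank_id c = r)
    (hnm : get_rank_id x ∉ ks)
    (hB0 : B (get_rank_id x) = []) :
    PySem.List.insertBy (fun a b => decide (get_rank_id a < get_rank_id b)) x (ks.flatMap B)
      = (PySem.List.insertBy (fun a b => decide (a < b)) (get_rank_id x) ks).flatMap
          (fun r => B r ++ if get_rank_id x == r then [x] else []) := by
  induction ks with
  | nil =>
    rw [List.flatMap_nil, insertBy_nil, insertBy_nil, List.flatMap_cons, List.flatMap_nil]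
    simp [hB0]
  | cons s ks ih =>
    rcases List.pairwise_cons.mp hp with ⟨hs, hp'⟩
    have hne : get_rank_id x ≠ s := fun h => hnm (h ▸ List.mem_cons_self)
    rw [insertBy_cons (fun a b => decide (a < b))]
    by_cases hlt : get_rank_id x < s
    · rw [if_pos (by simpa using hlt)]
      rw [insertBy_all_before _ _ _ (by
        intro y hy
        have hk := key_mem_flatMap B (s :: ks) hB y hy
        have : get_rank_id x < get_rank_id y := by
          rcases List.mem_cons.mp hk with h | h
          · omega
          · have := hs _ h; omega
        simpa using this)]
      rw [List.flatMap_cons (f := fun r => B r ++ if get_rank_id x == r then [x] else [])]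
      rw [flatMap_no_key x B (s :: ks) (by
        intro r hr
        rcases List.mem_cons.mp hr with h | h
        · omega
        · have := hs _ h; omega)]
      simp [hB0]
    · have hslt : s < get_rank_id x := by omega
      rw [if_neg (by simpa using hlt), List.flatMap_cons, List.flatMap_cons]
      rw [insertBy_append_left _ _ _ _ (by
        intro y hy
        rw [hB s y hy]
        simp only [decide_eq_false_iff_not, not_lt]
        omega)]
      rw [ih hp' (fun h => hnm (List.mem_cons_of_mem _ h))]
      have h1 : (if (get_rank_id x == s) then [x] else ([] : List Int)) = [] := by simp [hne]
      rw [h1]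
      simp

lemma bucket_append (xs : List Int) (x : Int) (r : Int) :
    bucketOf (xs ++ [x]) r = bucketOf xs r ++ if get_rank_id x == r then [x] else [] := by
  unfold bucketOf
  rw [List.filter_append]
  cases h : (get_rank_id x == r) <;> simp [List.filter, h]

lemma bucket_key (cards : List Int) : ∀ r, ∀ c ∈ bucketOf cards r, get_rank_id c = r := by
  intro r c hc
  have := List.of_mem_filter hc
  simpa using this

lemma ranks_pairwise (cards : List Int) : (ranksOf cards).Pairwise (· < ·) :=
  PySem.List.sorted_ofList_pairwise_lt _

lemma mem_ranks (cards : List Int) (r : Int) :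
    r ∈ ranksOf cards ↔ ∃ c ∈ cards, get_rank_id c = r := by
  unfold ranksOf
  rw [PySem.List.mem_sorted, PySem.Set.mem_ofList, List.mem_map]

-- the stable sort by rank is the concatenation of the rank buckets over the sorted distinct ranks
lemma flat_sorted (cards : List Int) :
    PySem.List.sorted cards get_rank_id = (ranksOf cards).flatMap (bucketOf cards) := by
  induction cards using List.reverseRecOn with
  | nil => rfl
  | append_singleton xs x ih =>
    rw [PySem.List.sorted_eq_foldl_insertBy, List.foldl_append, List.foldl_cons, List.foldl_nil,
        ← PySem.List.sorted_eq_foldl_insertBy, ih]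
    have hbf : bucketOf (xs ++ [x])
        = fun r => bucketOf xs r ++ if get_rank_id x == r then [x] else [] :=
      funext (bucket_append xs x)
    have hks : ranksOf (xs ++ [x]) =
        PySem.List.sorted (PySem.Set.add (PySem.Set.ofList (xs.map get_rank_id)) (get_rank_id x))
          (fun x => x) := by
      unfold ranksOf
      rw [List.map_append, List.map_cons, List.map_nil, PySem.Set.ofList_append_singleton]
    by_cases hmem : get_rank_id x ∈ PySem.Set.ofList (xs.map get_rank_id)
    · rw [hks, PySem.Set.add_of_mem hmem,
          show PySem.List.sorted (PySem.Set.ofList (xs.map get_rank_id)) (fun x => x) = ranksOf xs from rfl,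
          hbf]
      exact ins_mem x (ranksOf xs) (bucketOf xs) (ranks_pairwise xs) (bucket_key xs)
        (by
          rw [mem_ranks]
          have hmem' := hmem
          rw [PySem.Set.mem_ofList] at hmem'
          rcases List.mem_map.mp hmem' with ⟨c, hc, hk⟩
          exact ⟨c, hc, hk⟩)
    · rw [hks, PySem.Set.add_of_not_mem hmem,
          PySem.List.sorted_eq_foldl_insertBy, List.foldl_append, List.foldl_cons, List.foldl_nil,
          ← PySem.List.sorted_eq_foldl_insertBy,
          show PySem.List.sorted (PySem.Set.ofList (xs.map get_rank_id)) (fun x => x) = ranksOf xs from rfl,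
          hbf]
      have hB0 : bucketOf xs (get_rank_id x) = [] := by
        unfold bucketOf
        rw [List.filter_eq_nil_iff]
        intro c hc hbeq
        apply hmem
        rw [PySem.Set.mem_ofList]
        have hk : get_rank_id c = get_rank_id x := by simpa using hbeq
        exact hk ▸ List.mem_map_of_mem hc
      exact ins_not_mem x (ranksOf xs) (bucketOf xs) (ranks_pairwise xs) (bucket_key xs)
        (fun h => hmem (by
          rcases (mem_ranks xs _).mp h with ⟨c, hc, hk⟩
          rw [PySem.Set.mem_ofList]
          exact hk ▸ List.mem_map_of_mem hc)) hB0

lemma scan_const (b : List Int) :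
    ∀ (M : List (List Int)) (r : Int) (run : List Int), (∀ c ∈ b, get_rank_id c = r) →
    b.foldl meldStep (M, some r, run) = (M, some r, run ++ b) := by
  induction b with
  | nil => intro M r run _; simp
  | cons c b ih =>
    intro M r run h
    have hc : get_rank_id c = r := h c List.mem_cons_self
    rw [List.foldl_cons]
    have hstep : meldStep (M, some r, run) c = (M, some r, run ++ [c]) := by
      unfold meldStep
      rw [if_pos (Or.inr (by rw [hc]))]
      rw [hc]
    rw [hstep, ih M r (run ++ [c]) (fun d hd => h d (List.mem_cons_of_mem _ hd))]
    simp

lemma scan_blocks (rs : List Int) :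
    ∀ (B : Int → List Int) (M : List (List Int)) (r : Int) (run : List Int),
    (∀ s ∈ rs, B s ≠ [] ∧ ∀ c ∈ B s, get_rank_id c = s) → rs.Pairwise (· < ·) →
    (∀ s ∈ rs, r < s) →
    finishMelds ((rs.flatMap B).foldl meldStep (M, some r, run)) =
      M ++ (run :: rs.map B).filter (fun b => decide (3 ≤ b.length)) := by
  induction rs with
  | nil =>
    intro B M r run _ _ _
    rw [List.flatMap_nil, List.foldl_nil, List.map_nil]
    unfold finishMelds
    by_cases h : 3 ≤ run.length
    · rw [if_pos h]; simp [List.filter, h]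
    · rw [if_neg h]; simp [List.filter, h]
  | cons s rs ih =>
    intro B M r run hblocks hp hlt
    rcases hblocks s List.mem_cons_self with ⟨hne, hkey⟩
    obtain ⟨c, b', hb⟩ : ∃ c b', B s = c :: b' := by
      cases hB : B s with
      | nil => exact absurd hB hne
      | cons c b' => exact ⟨c, b', rfl⟩
    rcases List.pairwise_cons.mp hp with ⟨hs, hp'⟩
    rw [List.flatMap_cons, List.foldl_append, hb, List.foldl_cons]
    have hcr : get_rank_id c = s := hkey c (hb ▸ List.mem_cons_self)
    have hrs : r ≠ s := ne_of_lt (hlt s List.mem_cons_self)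
    have hstep : meldStep (M, some r, run) c =
        ((if 3 ≤ run.length then M ++ [run] else M), some s, [c]) := by
      unfold meldStep
      rw [if_neg (by rw [hcr]; simp [hrs])]
      rw [hcr]
    rw [hstep,
        scan_const b' _ s [c] (fun d hd => hkey d (hb ▸ List.mem_cons_of_mem _ hd)),
        show ([c] ++ b' : List Int) = B s by rw [hb]; rfl,
        ih B _ s (B s) (fun t ht => hblocks t (List.mem_cons_of_mem _ ht)) hp' hs,
        List.map_cons]
    by_cases h3 : 3 ≤ run.length
    · simp [List.filter, h3]
    · simp [List.filter, h3]

lemma melds_top (cards : List Int) :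
    finishMelds ((PySem.List.sorted cards get_rank_id).foldl meldStep ([], none, [])) =
      ((ranksOf cards).map (bucketOf cards)).filter (fun b => decide (3 ≤ b.length)) := by
  cases hks : ranksOf cards with
  | nil =>
    rw [flat_sorted, hks, List.flatMap_nil, List.foldl_nil, List.map_nil]
    rfl
  | cons s rs =>
    rw [flat_sorted, hks]
    have hpw := ranks_pairwise cards
    rw [hks] at hpw
    rcases List.pairwise_cons.mp hpw with ⟨hs, hp'⟩
    have hblocks : ∀ t ∈ (s :: rs), bucketOf cards t ≠ [] ∧
        ∀ c ∈ bucketOf cards t, get_rank_id c = t := by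
      intro t ht
      refine ⟨?_, bucket_key cards t⟩
      have htr : t ∈ ranksOf cards := by rw [hks]; exact ht
      rcases (mem_ranks cards t).mp htr with ⟨c, hc, hk⟩
      exact List.ne_nil_of_mem (List.mem_filter.mpr ⟨hc, by simp [hk]⟩)
    rcases hblocks s List.mem_cons_self with ⟨hne, hkey⟩
    obtain ⟨c, b', hb⟩ : ∃ c b', bucketOf cards s = c :: b' := by
      cases hB : bucketOf cards s with
      | nil => exact absurd hB hne
      | cons c b' => exact ⟨c, b', rfl⟩
    rw [List.flatMap_cons, List.foldl_append, hb, List.foldl_cons]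
    have hcr : get_rank_id c = s := hkey c (hb ▸ List.mem_cons_self)
    have hstep : meldStep ([], none, []) c = ([], some s, [c]) := by
      simp [meldStep, hcr]
    rw [hstep,
        scan_const b' _ s [c] (fun d hd => hkey d (hb ▸ List.mem_cons_of_mem _ hd)),
        show ([c] ++ b' : List Int) = bucketOf cards s by rw [hb]; rfl,
        scan_blocks rs (bucketOf cards) [] s (bucketOf cards s)
          (fun t ht => hblocks t (List.mem_cons_of_mem _ ht)) hp' hs,
        List.map_cons]
    simp

lemma bDict_getD (cards : List Int) (r : Int) :
    (bDict cards).getD r [] = bucketOf cards r := by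
  have h := PySem.Dict.getD_foldl_modify_append
    (cards.map (fun c => (PySem.Int.mod c 13, c))) PySem.Dict.empty r
  rw [List.foldl_map] at h
  have h2 : (bDict cards).getD r [] =
      PySem.Dict.empty.getD r [] ++
        (((cards.map (fun c => (PySem.Int.mod c 13, c))).filter (fun p => p.1 == r)).map (·.2)) := h
  rw [List.filter_map, List.map_map] at h2
  simp only [PySem.Dict.getD_empty, List.nil_append, Function.comp_def,
    List.map_id'] at h2
  exact h2.trans (by rfl)

lemma bDict_keys (cards : List Int) :
    (bDict cards).keys = PySem.Set.ofList (cards.map get_rank_id) := by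
  unfold bDict
  rw [PySem.Dict.keys_foldl_modify_key cards (fun c => PySem.Int.mod c 13) []
      (fun _ c => fun l => l ++ [c]) PySem.Dict.empty]
  rw [show PySem.Dict.empty.keys = (PySem.Set.empty : PySem.Set Int) from rfl,
      PySem.Set.update_empty]
  rfl

lemma fold_emit (f : Int → List Int) (rs : List Int) : ∀ (acc : List (List Int)),
    rs.foldl (fun result rank =>
      if 3 ≤ (f rank).length then emitMeld result (f rank) else result) acc
    = ((rs.map f).filter (fun b => decide (3 ≤ b.length))).foldl emitMeld acc := by
  induction rs with
  | nil => intro acc; rfl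
  | cons s rs ih =>
    intro acc
    rw [List.foldl_cons, List.map_cons, List.filter_cons]
    by_cases h : 3 ≤ (f s).length
    · rw [if_pos h, if_pos (by simpa using h), List.foldl_cons, ih]
    · rw [if_neg h, if_neg (by simpa using h), ih]

-- ===== VERDICT (by name: the statement is the Claim_ definition above) =====
theorem get_all_set_melds_spec : Claim_equal_get_all_set_melds := by
  intro cards _
  unfold Spec_get_all_set_melds
  have hA : get_all_set_melds cards =
      (finishMelds ((PySem.List.sorted cards get_rank_id).foldl meldStep ([], none, []))).foldl
        emitMeld [] := rfl
  have hB : get_all_set_melds_alt cards =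
      (PySem.List.sorted (bDict cards).keys (fun x => x)).foldl
        (fun result rank =>
          if 3 ≤ ((bDict cards).getD rank []).length then
            emitMeld result ((bDict cards).getD rank []) else result) [] := rfl
  rw [hA, hB, bDict_keys,
      show PySem.List.sorted (PySem.Set.ofList (cards.map get_rank_id)) (fun x => x)
        = ranksOf cards from rfl]
  simp only [bDict_getD]
  rw [fold_emit, melds_top]
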